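-- pv_equiv track=rewrite | github.com/Pramitha-Rupasingha/AutoShield-AI | detector/detector.py | assign_risk
-- ===== SOURCE A (Python) =====
-- def assign_risk(issue):
--     high_keywords = ["PUBLIC ACL", "ALL TRAFFIC", "SSH OPEN", "RDP OPEN", "ADMIN POLICY"]
--     medium_keywords = ["MFA NOT ENABLED", "NO ENCRYPTION", "PORT"]
--     low_keywords = ["VERSIONING DISABLED", "ACCESS KEY OLD"]
--
--     for keyword in high_keywords:
--         if keyword in issue:
--             return "HIGH"
--     for keyword in medium_keywords:
--         if keyword in issue:
--             return "MEDIUM"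
--     for keyword in low_keywords:
--         if keyword in issue:
--             return "LOW"
--     return "LOW"
-- ===== SOURCE B (Python) =====
-- def assign_risk(issue):
--     severity = {
--         "PUBLIC ACL": 3, "ALL TRAFFIC": 3, "SSH OPEN": 3, "RDP OPEN": 3, "ADMIN POLICY": 3,
--         "MFA NOT ENABLED": 2, "NO ENCRYPTION": 2, "PORT": 2,
--         "VERSIONING DISABLED": 1, "ACCESS KEY OLD": 1,
--     }
--     best = 0
--     for keyword, sev in severity.items():
--         if keyword in issue:
--             best = max(best, sev)
--     return {3: "HIGH", 2: "MEDIUM"}.get(best, "LOW")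
-- ===== Notes on version B (the rewrite author's own statement) =====
-- stated objective: simpler
-- what changed: Replaced the three priority-ordered early-return loops with one max-reduction over a flat keyword-to-severity table, translating the best severity back to a label at the end.
import Mathlib
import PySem

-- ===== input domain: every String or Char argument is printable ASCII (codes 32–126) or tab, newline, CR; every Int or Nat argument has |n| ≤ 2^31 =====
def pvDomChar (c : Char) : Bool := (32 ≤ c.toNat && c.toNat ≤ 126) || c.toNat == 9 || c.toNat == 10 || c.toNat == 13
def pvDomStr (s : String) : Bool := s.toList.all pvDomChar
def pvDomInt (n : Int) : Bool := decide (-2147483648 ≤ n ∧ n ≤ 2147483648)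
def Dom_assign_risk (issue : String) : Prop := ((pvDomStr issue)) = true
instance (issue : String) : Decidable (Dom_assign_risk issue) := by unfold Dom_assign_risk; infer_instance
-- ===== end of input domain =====

-- B replaces A's three priority-ordered early-return keyword loops by one max-reduction
-- over a flat keyword→severity table (objective: simpler).


-- ===== PORT A =====
-- 'for kw in lst: if kw in issue: return lbl' = the list has some keyword contained in issue
def pvAnyIn (kws : List String) (issue : String) : Bool :=
  kws.any (fun kw => PySem.Str.isIn kw issue)

def assign_risk (issue : String) : String :=
  if pvAnyIn ["PUBLIC ACL", "ALL TRAFFIC", "SSH OPEN", "RDP OPEN", "ADMIN POLICY"] issue then "HIGH"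
  else if pvAnyIn ["MFA NOT ENABLED", "NO ENCRYPTION", "PORT"] issue then "MEDIUM"
  else if pvAnyIn ["VERSIONING DISABLED", "ACCESS KEY OLD"] issue then "LOW"
  else "LOW"

-- ===== PORT B =====
def pvSeverityTable : List (String × Int) :=
  [("PUBLIC ACL", 3), ("ALL TRAFFIC", 3), ("SSH OPEN", 3), ("RDP OPEN", 3), ("ADMIN POLICY", 3),
   ("MFA NOT ENABLED", 2), ("NO ENCRYPTION", 2), ("PORT", 2),
   ("VERSIONING DISABLED", 1), ("ACCESS KEY OLD", 1)]

def assign_risk_alt (issue : String) : String :=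
  let best := pvSeverityTable.foldl
    (fun best p => if PySem.Str.isIn p.1 issue then max best p.2 else best) 0
  (PySem.Dict.mk [((3 : Int), "HIGH"), (2, "MEDIUM")]).getD best "LOW"

-- ===== PRECONDITION & SPEC =====
def Spec_assign_risk (issue : String) (out : String) : Prop := out = assign_risk_alt issue
instance (issue : String) (out : String) : Decidable (Spec_assign_risk issue out) := by unfold Spec_assign_risk; infer_instance

-- ===== CLAIM (what is proved, stated in full; the proofs are below) =====
def Claim_equal_assign_risk : Prop := ∀ (issue : String), Dom_assign_risk issue → Spec_assign_risk issue (assign_risk issue)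

-- ===== LEMMAS AND PROOFS =====
-- Both programs are functions of the ten membership Booleans alone; check all 2^10 cases.
theorem pvBoolCases : ∀ b1 b2 b3 b4 b5 b6 b7 b8 b9 b10 : Bool,
    (if b1 || (b2 || (b3 || (b4 || b5))) then "HIGH"
     else if b6 || (b7 || b8) then "MEDIUM"
     else if b9 || b10 then "LOW"
     else "LOW")
    = (PySem.Dict.mk [((3 : Int), "HIGH"), (2, "MEDIUM")]).getD
        ([((3:Int), b1), (3, b2), (3, b3), (3, b4), (3, b5),
          (2, b6), (2, b7), (2, b8), (1, b9), (1, b10)].foldl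
          (fun best p => if p.2 then max best p.1 else best) 0) "LOW" := by
  decide

-- ===== VERDICT (by name: the statement is the Claim_ definition above) =====
theorem assign_risk_spec : Claim_equal_assign_risk := by
  intro issue _
  show assign_risk issue = assign_risk_alt issue
  simp only [assign_risk, assign_risk_alt, pvAnyIn, pvSeverityTable, List.any_cons,
    List.any_nil, Bool.or_false]
  exact pvBoolCases _ _ _ _ _ _ _ _ _ _
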